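-- pv_equiv track=rewrite | github.com/traneric/computational_genomics_2024 | scripts/detect_amr_mge_intersections.py | combine_programmed_frameshift_coordinates
-- ===== SOURCE A (Python) =====
-- def combine_programmed_frameshift_coordinates(coordinates_dict):
--     for sample_ID, tuples in coordinates_dict.items():
--         subject_dict = {}
--         for start, end, subject_id in tuples:
--             if subject_id not in subject_dict:
--                 subject_dict[subject_id] = [start, end]
--             else:
--                 subject_dict[subject_id][0] = min(subject_dict[subject_id][0], start)
--                 subject_dict[subject_id][1] = max(subject_dict[subject_id][1], end)
--         coordinates_dict[sample_ID] = [(coords[0], coords[1], subject_id) for subject_id, coords in subject_dict.items()]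
--     return coordinates_dict
-- ===== SOURCE B (Python) =====
-- def combine_programmed_frameshift_coordinates(coordinates_dict):
--     for sample_ID, tuples in coordinates_dict.items():
--         groups = {}
--         for start, end, subject_id in tuples:
--             groups.setdefault(subject_id, []).append((start, end))
--         coordinates_dict[sample_ID] = [
--             (min(s for s, _ in ranges), max(e for _, e in ranges), subject_id)
--             for subject_id, ranges in groups.items()
--         ]
--     return coordinates_dict
-- ===== Notes on version B (the rewrite author's own statement) =====
-- stated objective: alternative
-- what changed: B replaces A's running min/max update inside the grouping loop by a collect-then-reduce decomposition: first pass appends every (start, end) range to a per-subject list via setdefault, second pass emits (min(starts), max(ends), subject_id) per group in first-seen order.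
import Mathlib
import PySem

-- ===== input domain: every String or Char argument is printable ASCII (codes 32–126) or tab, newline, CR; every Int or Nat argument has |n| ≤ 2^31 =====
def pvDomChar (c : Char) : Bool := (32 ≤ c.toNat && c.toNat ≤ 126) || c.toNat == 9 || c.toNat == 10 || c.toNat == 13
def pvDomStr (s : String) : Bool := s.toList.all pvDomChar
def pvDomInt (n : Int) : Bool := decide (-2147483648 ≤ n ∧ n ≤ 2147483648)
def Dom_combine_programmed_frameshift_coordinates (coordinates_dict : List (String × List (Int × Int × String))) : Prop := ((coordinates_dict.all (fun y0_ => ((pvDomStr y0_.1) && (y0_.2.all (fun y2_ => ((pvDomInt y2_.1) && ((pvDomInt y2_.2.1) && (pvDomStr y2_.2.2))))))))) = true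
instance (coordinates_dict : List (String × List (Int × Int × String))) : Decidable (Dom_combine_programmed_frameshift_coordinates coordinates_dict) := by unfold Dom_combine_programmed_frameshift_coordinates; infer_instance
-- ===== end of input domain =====

-- B replaces A's running min/max update by a collect-then-reduce decomposition (group all
-- ranges per subject first, then take min/max over each group); same cost, same in-place
-- mutation of coordinates_dict as A.


-- ===== PORT A =====
-- For each sample: one dict pass keeping a RUNNING [min_start, max_end] per subject_id
-- (Python's two-element list [start, end] is the pair; its two in-place element updates
-- are the single insert of the updated pair), then emit (start, end, subject_id) tuples.
def combine_programmed_frameshift_coordinates (coordinates_dict : List (String × List (Int × Int × String))) : List (String × List (Int × Int × String)) :=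
  coordinates_dict.map (fun sample =>
    let subject_dict : PySem.Dict String (Int × Int) :=
      sample.2.foldl (fun d t =>
        if d.contains t.2.2 = false then
          d.insert t.2.2 (t.1, t.2.1)
        else
          d.insert t.2.2 (min (d.getD t.2.2 (0, 0)).1 t.1, max (d.getD t.2.2 (0, 0)).2 t.2.1))
        PySem.Dict.empty
    (sample.1, subject_dict.items.map (fun p => (p.2.1, p.2.2, p.1))))

-- ===== PORT B =====
-- Collect-then-reduce: first pass appends every (start, end) to a per-subject list
-- (setdefault/append = Dict.modify with default []), second pass takes min/max per group.
def combine_programmed_frameshift_coordinates_alt (coordinates_dict : List (String × List (Int × Int × String))) : List (String × List (Int × Int × String)) :=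
  coordinates_dict.map (fun sample =>
    let groups : PySem.Dict String (List (Int × Int)) :=
      sample.2.foldl (fun d t => d.modify t.2.2 [] (fun rs => rs ++ [(t.1, t.2.1)]))
        PySem.Dict.empty
    (sample.1, groups.items.map (fun p =>
      match p.2 with
      | [] => (0, 0, p.1)   -- unreachable: every collected group is nonempty (Python min/max would raise on [])
      | (s, e) :: rest =>
          (rest.foldl (fun m q => min m q.1) s, rest.foldl (fun m q => max m q.2) e, p.1))))

-- ===== PRECONDITION & SPEC =====
def Spec_combine_programmed_frameshift_coordinates (coordinates_dict : List (String × List (Int × Int × String))) (out : List (String × List (Int × Int × String))) : Prop := out = combine_programmed_frameshift_coordinates_alt coordinates_dict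
instance (coordinates_dict : List (String × List (Int × Int × String))) (out : List (String × List (Int × Int × String))) : Decidable (Spec_combine_programmed_frameshift_coordinates coordinates_dict out) := by unfold Spec_combine_programmed_frameshift_coordinates; infer_instance

-- ===== CLAIM (what is proved, stated in full; the proofs are below) =====
def Claim_equal_combine_programmed_frameshift_coordinates : Prop := ∀ (coordinates_dict : List (String × List (Int × Int × String))), Dom_combine_programmed_frameshift_coordinates coordinates_dict → Spec_combine_programmed_frameshift_coordinates coordinates_dict (combine_programmed_frameshift_coordinates coordinates_dict)

-- ===== LEMMAS AND PROOFS =====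

-- the reduction B applies to one collected group, as a named function
def pvRed (rs : List (Int × Int)) : Int × Int :=
  match rs with
  | [] => (0, 0)
  | (s, e) :: rest => (rest.foldl (fun m q => min m q.1) s, rest.foldl (fun m q => max m q.2) e)

-- B's grouping dict, reduced pointwise: this IS A's running dict (lemma foldA_eq_toA)
def pvToA (d : PySem.Dict String (List (Int × Int))) : PySem.Dict String (Int × Int) :=
  PySem.Dict.mk (d.items.map (fun p => (p.1, pvRed p.2)))

def pvStepA (d : PySem.Dict String (Int × Int)) (t : Int × Int × String) : PySem.Dict String (Int × Int) :=
  if d.contains t.2.2 = false then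
    d.insert t.2.2 (t.1, t.2.1)
  else
    d.insert t.2.2 (min (d.getD t.2.2 (0, 0)).1 t.1, max (d.getD t.2.2 (0, 0)).2 t.2.1)

def pvStepB (d : PySem.Dict String (List (Int × Int))) (t : Int × Int × String) : PySem.Dict String (List (Int × Int)) :=
  d.modify t.2.2 [] (fun rs => rs ++ [(t.1, t.2.1)])

def pvInv (d : PySem.Dict String (List (Int × Int))) : Prop :=
  ∀ k rs, d.get? k = some rs → rs ≠ []

theorem pvRed_append (rs : List (Int × Int)) (s e : Int) (h : rs ≠ []) :
    pvRed (rs ++ [(s, e)]) = (min (pvRed rs).1 s, max (pvRed rs).2 e) := by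
  match rs with
  | [] => exact absurd rfl h
  | (s0, e0) :: rest => simp [pvRed, List.foldl_append]

theorem pvGet?_toA (d : PySem.Dict String (List (Int × Int))) (k : String) :
    (pvToA d).get? k = (d.get? k).map pvRed := by
  obtain ⟨l⟩ := d
  induction l with
  | nil => rfl
  | cons p rest ih =>
    obtain ⟨k', v⟩ := p
    have hrest : (pvToA (PySem.Dict.mk rest)).get? k
        = ((PySem.Dict.mk rest).get? k).map pvRed := ih
    simp only [pvToA, List.map_cons, PySem.Dict.get?_mk_cons] at hrest ⊢
    by_cases h : (k' == k) = true <;> simp [h, hrest]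

theorem pvContains_toA (d : PySem.Dict String (List (Int × Int))) (k : String) :
    (pvToA d).contains k = d.contains k := by
  rw [PySem.Dict.contains_eq_isSome_get?, PySem.Dict.contains_eq_isSome_get?, pvGet?_toA]
  cases d.get? k <;> rfl

theorem pvToA_insert (d : PySem.Dict String (List (Int × Int))) (k : String) (rs : List (Int × Int)) :
    pvToA (d.insert k rs) = (pvToA d).insert k (pvRed rs) := by
  apply PySem.Dict.ext
  rw [show (pvToA (d.insert k rs)).items = (d.insert k rs).items.map (fun p => (p.1, pvRed p.2)) from rfl,
      PySem.Dict.items_insert, PySem.Dict.items_insert, pvContains_toA]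
  by_cases h : d.contains k = true
  · simp only [h, if_true]
    rw [show (pvToA d).items = d.items.map (fun p => (p.1, pvRed p.2)) from rfl]
    rw [List.map_map, List.map_map]
    apply List.map_congr_left
    intro p _
    by_cases hk : p.1 = k <;> simp [hk]
  · simp only [h]
    rw [show (pvToA d).items = d.items.map (fun p => (p.1, pvRed p.2)) from rfl]
    simp

theorem pvStep_comm (d : PySem.Dict String (List (Int × Int))) (t : Int × Int × String)
    (hinv : pvInv d) : pvStepA (pvToA d) t = pvToA (pvStepB d t) := by
  obtain ⟨s, e, sid⟩ := t
  have hmod : pvStepB d (s, e, sid) = d.insert sid (d.getD sid [] ++ [(s, e)]) := rfl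
  rw [hmod, pvToA_insert]
  by_cases hc : d.contains sid = true
  · -- key present: group is nonempty, reduce of append = running min/max
    have hsome : ∃ rs, d.get? sid = some rs := by
      rw [PySem.Dict.contains_eq_isSome_get?] at hc
      cases h : d.get? sid with
      | none => rw [h] at hc; simp at hc
      | some rs => exact ⟨rs, rfl⟩
    obtain ⟨rs, hrs⟩ := hsome
    have hne : rs ≠ [] := hinv sid rs hrs
    have hgd : d.getD sid [] = rs := by rw [PySem.Dict.getD_eq_get?_getD, hrs]; rfl
    have hgdA : (pvToA d).getD sid (0, 0) = pvRed rs := by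
      rw [PySem.Dict.getD_eq_get?_getD, pvGet?_toA, hrs]; rfl
    simp only [pvStepA, pvContains_toA, hc, hgd, hgdA, if_neg (by decide : ¬ (true = false))]
    rw [pvRed_append rs s e hne]
  · -- fresh key: group is the singleton [(s, e)]
    have hcf : d.contains sid = false := by
      cases h : d.contains sid with
      | false => rfl
      | true => exact absurd h hc
    have hnone : d.get? sid = none := by
      rw [PySem.Dict.contains_eq_isSome_get?] at hcf
      cases h : d.get? sid with
      | none => rfl
      | some rs => rw [h] at hcf; simp at hcf
    have hgd : d.getD sid [] = [] := by rw [PySem.Dict.getD_eq_get?_getD, hnone]; rfl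
    simp only [pvStepA, pvContains_toA, hcf, hgd]
    rfl

theorem pvInv_step (d : PySem.Dict String (List (Int × Int))) (t : Int × Int × String)
    (hinv : pvInv d) : pvInv (pvStepB d t) := by
  obtain ⟨s, e, sid⟩ := t
  intro k rs hk
  have : (d.insert sid (d.getD sid [] ++ [(s, e)])).get? k = some rs := hk
  rw [PySem.Dict.get?_insert] at this
  by_cases h : k = sid
  · rw [if_pos h] at this
    simp only [Option.some.injEq] at this
    subst this; simp
  · rw [if_neg h] at this
    exact hinv k rs this

theorem pvFoldA_eq_toA (l : List (Int × Int × String)) :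
    ∀ (d : PySem.Dict String (List (Int × Int))), pvInv d →
      l.foldl pvStepA (pvToA d) = pvToA (l.foldl pvStepB d) := by
  induction l with
  | nil => intro d _; rfl
  | cons t rest ih =>
    intro d hinv
    simp only [List.foldl_cons]
    rw [pvStep_comm d t hinv]
    exact ih (pvStepB d t) (pvInv_step d t hinv)

theorem pvInv_empty : pvInv (PySem.Dict.empty : PySem.Dict String (List (Int × Int))) := by
  intro k rs h
  simp [PySem.Dict.get?_empty] at h

-- ===== VERDICT (by name: the statement is the Claim_ definition above) =====
theorem combine_programmed_frameshift_coordinates_spec : Claim_equal_combine_programmed_frameshift_coordinates := by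
  intro cd _
  unfold Spec_combine_programmed_frameshift_coordinates
  unfold combine_programmed_frameshift_coordinates combine_programmed_frameshift_coordinates_alt
  apply List.map_congr_left
  intro sample _
  have hdict : sample.2.foldl pvStepA PySem.Dict.empty
      = pvToA (sample.2.foldl pvStepB PySem.Dict.empty) := by
    have := pvFoldA_eq_toA sample.2 PySem.Dict.empty pvInv_empty
    rwa [show pvToA PySem.Dict.empty = PySem.Dict.empty from rfl] at this
  show (sample.1, ((sample.2.foldl pvStepA PySem.Dict.empty).items.map (fun p => (p.2.1, p.2.2, p.1)))) = _
  rw [hdict]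
  refine congrArg (fun z => (sample.1, z)) ?_
  rw [show (pvToA (sample.2.foldl pvStepB PySem.Dict.empty)).items
      = (sample.2.foldl pvStepB PySem.Dict.empty).items.map (fun p => (p.1, pvRed p.2)) from rfl,
    List.map_map]
  apply List.map_congr_left
  intro p _
  obtain ⟨k, rs⟩ := p
  match rs with
  | [] => rfl
  | (s0, e0) :: rest => rfl
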